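-- pv_equiv track=rewrite | github.com/TvoozMagnificent/SolutionsToUSACO | Silver1.py | solve
-- ===== SOURCE A (Python) =====
-- dictionary = 'abcdefghijklmnopqrstuvwxyzABCDEFGHIJKLMNOPQRSTUVWXYZ'
--
-- def solve(graph):
--
--     count = 0
--     flag = 1
--
--     if len(graph) == len({*graph.values()}) == len(dictionary): # length of graph is length of targets --> made of pure loops
--         if graph == {i: i for i in dictionary}: return 0 # we are already done, nothing needed
--         else: return-1 # impossible
--
--     while graph: # while not finished
--
--         path = []
--         possible = [vertex for vertex in graph if vertex not in graph.values()] # sources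
--         if possible: current = possible[0] # if there is a source, use a source
--         else: current = [*graph][0] # else use a random vertex, since we only have pure loops left
--         while current not in path: # follow down the path
--             path.append(current) # add current node
--             if current not in graph: break # no next node: just a tree
--             current = graph.pop(current) # delete vertex and follow down
--         if current == path[-1]: # happens either when we have a self loop or a sink
--             count += len(path) - 1 # length - 1 moves
--         elif current == path[0]: # happens when we used a random vertex and finds a pure loop
--             count += len(path) + 1 # length + 1 moves
--         else: # unpure loop
--             count += len(path) # length moves
--
--     return count # return number of moves
-- ===== SOURCE B (Python) =====
-- dictionary = 'abcdefghijklmnopqrstuvwxyzABCDEFGHIJKLMNOPQRSTUVWXYZ'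
--
-- def solve(graph):
--     # Closed-form count (no removal simulation); return-value equivalent to A,
--     # and unlike A it does not mutate the argument dict.
--     if len(graph) == len({*graph.values()}) == len(dictionary):
--         return 0 if graph == {i: i for i in dictionary} else -1
--     moves = sum(1 for k, v in graph.items() if v != k)
--     bonus = 0
--     for k in graph:
--         cyc = _cycle_through(graph, k)
--         if cyc is not None and len(cyc) >= 2 and k == min(cyc) and _is_pure(graph, cyc):
--             bonus += 1
--     return moves + bonus
--
-- def _cycle_through(graph, k):
--     # the cycle [k, graph[k], ...] if following edges from k returns to k, else None
--     u, cyc = k, []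
--     for _ in range(len(graph)):
--         if u not in graph:
--             return None
--         cyc.append(u)
--         u = graph[u]
--         if u == k:
--             return cyc
--     return None
--
-- def _is_pure(graph, cyc):
--     # no edge from outside the cycle points into it
--     cs = set(cyc)
--     return all(k in cs for k, v in graph.items() if v in cs)
-- ===== Notes on version B (the rewrite author's own statement) =====
-- stated objective: faster
-- what changed: B drops A's destructive simulation (the while-graph loop with per-iteration source rescans, path walks and end-of-walk case analysis on a shrinking dict) and instead computes the answer in closed form: the number of non-fixed-point edges plus one bonus per pure cycle of length >= 2 (a cycle with no in-edge from outside), found by a per-key orbit check on the unchanged dict; B also does not mutate the caller's dict (A empties it).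
import Mathlib
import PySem

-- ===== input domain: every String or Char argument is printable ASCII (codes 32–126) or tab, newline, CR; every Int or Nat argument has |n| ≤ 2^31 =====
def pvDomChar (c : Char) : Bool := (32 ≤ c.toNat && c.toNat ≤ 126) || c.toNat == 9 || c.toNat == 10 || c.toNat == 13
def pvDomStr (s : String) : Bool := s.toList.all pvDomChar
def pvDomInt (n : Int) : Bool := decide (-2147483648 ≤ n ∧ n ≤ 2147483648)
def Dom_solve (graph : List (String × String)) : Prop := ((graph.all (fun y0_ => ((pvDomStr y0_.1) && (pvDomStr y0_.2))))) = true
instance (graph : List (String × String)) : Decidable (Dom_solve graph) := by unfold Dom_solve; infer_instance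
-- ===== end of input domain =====

-- B replaces A's destructive while-loop simulation (source rescans, path walks, end-of-walk case
-- analysis on a shrinking dict) by a closed-form count: the number of non-fixed-point edges plus one
-- bonus per pure cycle of length ≥ 2, found by a per-key orbit check on the unchanged dict.
-- Equivalence is about the RETURN value: Python A empties its argument dict, Python B does not mutate it.

-- shared module-level constant (Python: dictionary = 'abc…XYZ')
def pvDictionary : String := "abcdefghijklmnopqrstuvwxyzABCDEFGHIJKLMNOPQRSTUVWXYZ"

-- Python's order-insensitive 'graph == {i: i for i in dictionary}' (same keys, same value at each key)
def pvIsIdentityDict (d : PySem.Dict String String) : Bool :=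
  ((d.size : Int) == PySem.Str.len pvDictionary) &&
  pvDictionary.toList.all (fun c => d.get? (String.ofList [c]) == some (String.ofList [c]))

-- ===== PORT A =====
-- inner 'while current not in path' loop; fuel g.size+1 suffices: every non-exit step pops a key
def solveWalk : Nat → PySem.Dict String String → List String → String →
    PySem.Dict String String × List String × String
  | 0, g, path, current => (g, path, current)
  | Nat.succ fuel, g, path, current =>
    if path.contains current then (g, path, current)
    else
      match g.pop? current with
      | none => (g, path ++ [current], current)
      | some (nxt, g') => solveWalk fuel g' (path ++ [current]) nxt

-- the if/elif/else classification at the end of each outer iteration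
def solveClassify (count : Int) (path : List String) (current : String) : Int :=
  if current = path.getLastD "" then count + (path.length : Int) - 1
  else if current = path.headD "" then count + (path.length : Int) + 1
  else count + (path.length : Int)

-- outer 'while graph' loop; fuel g.size+1 suffices: every iteration pops at least one key
def solveLoop : Nat → PySem.Dict String String → Int → Int
  | 0, _, count => count
  | Nat.succ fuel, g, count =>
    if g.size == 0 then count
    else
      let possible := g.keys.filter (fun v => !(g.values.contains v))
      let current := match possible with
        | c :: _ => c
        | [] => g.keys.headD ""
      let r := solveWalk (g.size + 1) g [] current
      solveLoop fuel r.1 (solveClassify count r.2.1 r.2.2)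

def solve (graph : List (String × String)) : Int :=
  let g := PySem.Dict.ofList graph
  if ((g.size : Int) == PySem.Set.len (PySem.Set.ofList g.values)) &&
     (PySem.Set.len (PySem.Set.ofList g.values) == PySem.Str.len pvDictionary) then
    if pvIsIdentityDict g then 0 else -1
  else solveLoop (g.size + 1) g 0

-- ===== PORT B =====
-- _cycle_through's 'for _ in range(len(graph))' loop: follow edges from k, collecting, until back at k
def altCycGo : Nat → PySem.Dict String String → String → String → List String →
    Option (List String)
  | 0, _, _, _, _ => none
  | Nat.succ fuel, g, k, u, cyc =>
    match g.get? u with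
    | none => none
    | some v => if v = k then some (cyc ++ [u]) else altCycGo fuel g k v (cyc ++ [u])

-- the cycle [k, graph[k], …] if following edges from k returns to k, else none
def altCycleThrough (g : PySem.Dict String String) (k : String) : Option (List String) :=
  altCycGo g.size g k k []

-- _is_pure: no edge from outside the cycle points into it (cs = set(cyc))
def altIsPure (g : PySem.Dict String String) (cyc : List String) : Bool :=
  let cs := PySem.Set.ofList cyc
  (g.items.filter (fun p => cs.contains p.2)).all (fun p => cs.contains p.1)

-- the body of B's bonus loop for one key
def altRep (g : PySem.Dict String String) (k : String) : Bool :=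
  match altCycleThrough g k with
  | some cyc =>
      decide (2 ≤ cyc.length) && (PySem.List.min? cyc (fun x => x) == some k) && altIsPure g cyc
  | none => false

-- moves = sum(1 for k, v in graph.items() if v != k)
def altMoves (g : PySem.Dict String String) : Int :=
  g.items.foldl (fun a p => if p.2 ≠ p.1 then a + 1 else a) 0

-- bonus: one per pure cycle of length >= 2, counted at its minimal element
def altBonus (g : PySem.Dict String String) : Int :=
  g.keys.foldl (fun b k => if altRep g k then b + 1 else b) 0

def solve_alt (graph : List (String × String)) : Int :=
  let g := PySem.Dict.ofList graph
  if ((g.size : Int) == PySem.Set.len (PySem.Set.ofList g.values)) &&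
     (PySem.Set.len (PySem.Set.ofList g.values) == PySem.Str.len pvDictionary) then
    if pvIsIdentityDict g then 0 else -1
  else altMoves g + altBonus g

-- ===== PRECONDITION & SPEC =====
def Spec_solve (graph : List (String × String)) (out : Int) : Prop := out = solve_alt graph
instance (graph : List (String × String)) (out : Int) : Decidable (Spec_solve graph out) := by
  unfold Spec_solve; infer_instance

-- ===== CLAIM (what is proved, stated in full; the proofs are below) =====
def Claim_equal_solve : Prop := ∀ (graph : List (String × String)), Dom_solve graph → Spec_solve graph (solve graph)

-- ===== LEMMAS AND PROOFS =====

-- ---------- proof-only helper definitions ----------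

-- the dict g with every key in D removed
def restrictOut (g : PySem.Dict String String) (D : List String) : PySem.Dict String String :=
  PySem.Dict.mk (g.items.filter (fun p => !(D.contains p.1)))

-- n-fold application of the partial successor function of g
def iterG (g : PySem.Dict String String) : Nat → String → Option String
  | 0, x => some x
  | Nat.succ n, x => match g.get? x with
    | none => none
    | some y => iterG g n y

-- consecutive elements of l are g-successor pairs
def ChainL (g : PySem.Dict String String) (l : List String) : Prop :=
  ∀ i : Nat, (h : i + 1 < l.length) →
    g.get? (l[i]'(by omega)) = some (l[i+1]'h)

-- O is closed under the successor function of g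
def ClosedL (g : PySem.Dict String String) (O : List String) : Prop :=
  ∀ x ∈ O, ∃ y ∈ O, g.get? x = some y

-- the bundle of facts describing a cycle list through k
structure CycF (g : PySem.Dict String String) (k : String) (cyc : List String) : Prop where
  ne : cyc ≠ []
  head : cyc.headD "" = k
  chain : ChainL g cyc
  wrap : g.get? (cyc.getLastD "") = some k
  nodup : cyc.Nodup
  keys : ∀ x ∈ cyc, x ∈ g.keys

def CyclicG (g : PySem.Dict String String) (k : String) : Prop :=
  ∃ p : Nat, 1 ≤ p ∧ iterG g p k = some k

-- ---------- basic lemmas (all sorried initially) ----------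

theorem countIf_foldl_str (l : List String) (p : String → Bool) (a : Int) :
    l.foldl (fun a q => if p q then a + 1 else a) a = a + ((l.filter p).length : Int) := by
  induction l generalizing a with
  | nil => simp
  | cons x t ih =>
    by_cases h : p x <;> simp [List.filter_cons, h, ih] <;> push_cast <;> ring

theorem get?_restrictOut (g : PySem.Dict String String) (D : List String) (x : String) :
    (restrictOut g D).get? x = if x ∈ D then none else g.get? x := by
  obtain ⟨l⟩ := g
  simp only [restrictOut, PySem.Dict.get?]
  show (List.find? (fun p => p.1 == x) (l.filter (fun p => !(D.contains p.1)))).map (fun x => x.2)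
      = if x ∈ D then none else (List.find? (fun p => p.1 == x) l).map (fun x => x.2)
  by_cases hx : x ∈ D
  · rw [if_pos hx]
    have hnone : List.find? (fun p => p.1 == x) (l.filter (fun p => !(D.contains p.1))) = none := by
      rw [List.find?_eq_none]
      intro p hp hq
      have h1 : p.1 ∉ D := by simpa using (List.mem_filter.mp hp).2
      have h2 : p.1 = x := by simpa using hq
      exact h1 (h2 ▸ hx)
    rw [hnone]; rfl
  · rw [if_neg hx]
    induction l with
    | nil => rfl
    | cons hd t ih =>
      rw [List.filter_cons]
      by_cases hm : hd.1 ∈ D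
      · have hr : (!(D.contains hd.1)) = false := by simpa using hm
        rw [hr]
        simp only [Bool.false_eq_true, if_false]
        have hq : (hd.1 == x) = false := by
          simp only [beq_eq_false_iff_ne, ne_eq]
          rintro rfl; exact hx hm
        simp only [List.find?_cons, hq]
        exact ih
      · have hr : (!(D.contains hd.1)) = true := by simpa using hm
        rw [hr]
        simp only [if_true]
        by_cases hq : (hd.1 == x) = true
        · simp only [List.find?_cons, hq]
        · have hq' : (hd.1 == x) = false := by simpa using hq
          simp only [List.find?_cons, hq']
          exact ih

theorem keys_restrictOut (g : PySem.Dict String String) (D : List String) :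
    (restrictOut g D).keys = g.keys.filter (fun x => !(D.contains x)) := by
  obtain ⟨l⟩ := g
  simp only [restrictOut, PySem.Dict.keys, PySem.Dict.items]
  induction l with
  | nil => simp
  | cons hd t ih =>
    by_cases hm : hd.1 ∈ D
    · have h1 : (!(D.contains hd.1)) = false := by simpa using hm
      simp only [List.filter_cons, List.map_cons, h1, Bool.false_eq_true, if_false]
      exact ih
    · have h1 : (!(D.contains hd.1)) = true := by simpa using hm
      simp only [List.filter_cons, List.map_cons, h1, if_true]
      rw [ih]

theorem items_restrictOut (g : PySem.Dict String String) (D : List String) :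
    (restrictOut g D).items = g.items.filter (fun p => !(D.contains p.1)) := rfl

theorem nodup_keys_restrictOut (g : PySem.Dict String String) (D : List String)
    (nd : g.keys.Nodup) : (restrictOut g D).keys.Nodup := by
  rw [keys_restrictOut]
  exact nd.filter _

theorem restrictOut_nil (g : PySem.Dict String String) : restrictOut g [] = g := by
  apply PySem.Dict.ext
  simp [restrictOut]

theorem erase_restrictOut (g : PySem.Dict String String) (D : List String) (c : String) :
    (restrictOut g D).erase c = restrictOut g (D ++ [c]) := by
  apply PySem.Dict.ext
  simp only [PySem.Dict.erase, restrictOut, PySem.Dict.items, List.filter_filter]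
  apply List.filter_congr
  intro p _
  by_cases h1 : p.1 ∈ D <;> by_cases h2 : p.1 = c <;>
    simp [h1, h2, List.contains_append]

theorem mem_keys_of_get?_some (g : PySem.Dict String String) (x y : String)
    (h : g.get? x = some y) : x ∈ g.keys := by
  obtain ⟨l⟩ := g
  simp only [PySem.Dict.get?, PySem.Dict.items, Option.map_eq_some_iff] at h
  obtain ⟨p, hp, hy⟩ := h
  have hmem := List.mem_of_find?_eq_some hp
  have hq := List.find?_some hp
  have : p.1 = x := by simpa using hq
  simp only [PySem.Dict.keys, PySem.Dict.items, List.mem_map]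
  exact ⟨p, hmem, this⟩

theorem mem_values_of_get?_some (g : PySem.Dict String String) (x y : String)
    (h : g.get? x = some y) : y ∈ g.values := by
  obtain ⟨l⟩ := g
  simp only [PySem.Dict.get?, PySem.Dict.items, Option.map_eq_some_iff] at h
  obtain ⟨p, hp, hy⟩ := h
  have hmem := List.mem_of_find?_eq_some hp
  simp only [PySem.Dict.values, PySem.Dict.items, List.mem_map]
  exact ⟨p, hmem, hy⟩

theorem get?_isSome_of_mem_keys (g : PySem.Dict String String) (x : String)
    (h : x ∈ g.keys) : (g.get? x).isSome := by
  obtain ⟨l⟩ := g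
  simp only [PySem.Dict.keys, PySem.Dict.items, List.mem_map] at h
  obtain ⟨p, hp, hx⟩ := h
  simp only [PySem.Dict.get?, PySem.Dict.items, Option.isSome_map]
  rw [List.find?_isSome]
  exact ⟨p, hp, by simpa using hx⟩

-- ---------- iterate lemmas ----------

theorem iterG_add (g : PySem.Dict String String) (m n : Nat) (x : String) :
    iterG g (m + n) x = (iterG g m x).bind (iterG g n) := by
  induction m generalizing x with
  | zero => simp [iterG]
  | succ m ih =>
    have : m + 1 + n = (m + n) + 1 := by omega
    rw [this]
    show (match g.get? x with | none => none | some y => iterG g (m + n) y) = _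
    cases h : g.get? x with
    | none => simp [iterG, h]
    | some y => simp [iterG, h, ih]

theorem iterG_succ_right (g : PySem.Dict String String) (n : Nat) (x : String) :
    iterG g (n + 1) x = (iterG g n x).bind g.get? := by
  rw [iterG_add]
  cases iterG g n x with
  | none => rfl
  | some y =>
    show iterG g 1 y = g.get? y
    show (match g.get? y with | none => none | some z => iterG g 0 z) = g.get? y
    cases g.get? y <;> rfl

theorem iterG_mono (g g' : PySem.Dict String String)
    (hmono : ∀ x y, g'.get? x = some y → g.get? x = some y) (n : Nat) (x y : String)
    (h : iterG g' n x = some y) : iterG g n x = some y := by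
  induction n generalizing x with
  | zero => simpa [iterG] using h
  | succ n ih =>
    revert h
    show (match g'.get? x with | none => none | some z => iterG g' n z) = some y → _
    cases hg : g'.get? x with
    | none => intro h; cases h
    | some z =>
      intro h
      have := hmono x z hg
      show (match g.get? x with | none => none | some w => iterG g n w) = some y
      rw [this]
      exact ih z h

theorem chain_iter (g : PySem.Dict String String) (l : List String) (hc : ChainL g l)
    (j : Nat) (hj : j < l.length) : iterG g j (l.headD "") = some (l[j]'hj) := by
  induction j with
  | zero =>
    cases l with
    | nil => simp at hj
    | cons a t => simp [iterG]
  | succ j ih =>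
    have hj' : j < l.length := by omega
    rw [iterG_succ_right, ih hj']
    simpa using hc j hj

theorem iter_closed (g : PySem.Dict String String) (O : List String) (hO : ClosedL g O)
    (x : String) (hx : x ∈ O) (n : Nat) : ∃ y ∈ O, iterG g n x = some y := by
  induction n generalizing x with
  | zero => exact ⟨x, hx, rfl⟩
  | succ n ih =>
    obtain ⟨y, hy, hxy⟩ := hO x hx
    obtain ⟨z, hz, hyz⟩ := ih y hy
    refine ⟨z, hz, ?_⟩
    show (match g.get? x with | none => none | some w => iterG g n w) = some z
    rw [hxy]
    exact hyz

-- headD / getLastD as getElem, for nonempty lists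
theorem headD_eq_getElem (l : List String) (h : l ≠ []) (d : String) :
    l.headD d = l[0]'(List.length_pos_of_ne_nil h) := by
  cases l with
  | nil => exact absurd rfl h
  | cons a t => rfl

theorem lastD_eq_getElem (l : List String) (h : l ≠ []) (d : String) :
    l.getLastD d = l[l.length - 1]'(by have := List.length_pos_of_ne_nil h; omega) := by
  rw [List.getLastD_eq_getLast?, List.getLast?_eq_getElem?]
  rw [List.getElem?_eq_getElem (by have := List.length_pos_of_ne_nil h; omega)]
  rfl

-- a cycle list is closed
theorem cyc_closed (g : PySem.Dict String String) (k : String) (cyc : List String)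
    (hc : CycF g k cyc) : ClosedL g cyc := by
  intro x hx
  obtain ⟨j, hj, rfl⟩ := List.getElem_of_mem hx
  by_cases hj1 : j + 1 < cyc.length
  · exact ⟨cyc[j+1], List.getElem_mem _, hc.chain j hj1⟩
  · have hj' : j = cyc.length - 1 := by omega
    subst hj'
    refine ⟨k, ?_, ?_⟩
    · have hh := hc.head
      rw [headD_eq_getElem _ hc.ne] at hh
      rw [← hh]
      exact List.getElem_mem _
    · have hw := hc.wrap
      rwa [lastD_eq_getElem _ hc.ne] at hw

theorem cyc_iter (g : PySem.Dict String String) (k : String) (cyc : List String)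
    (hc : CycF g k cyc) (j : Nat) (hj : j < cyc.length) : iterG g j k = some (cyc[j]'hj) := by
  have h := chain_iter g cyc hc.chain j hj
  rwa [hc.head] at h

theorem cyc_iter_len (g : PySem.Dict String String) (k : String) (cyc : List String)
    (hc : CycF g k cyc) : iterG g cyc.length k = some k := by
  have h0 : 0 < cyc.length := List.length_pos_of_ne_nil hc.ne
  have h1 : cyc.length = (cyc.length - 1) + 1 := by omega
  rw [h1, iterG_succ_right, cyc_iter g k cyc hc (cyc.length - 1) (by omega)]
  have hw := hc.wrap
  rw [lastD_eq_getElem _ hc.ne] at hw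
  simpa using hw

-- every element of a closed set O that meets the cycle absorbs the whole cycle
theorem orbit_sub (g : PySem.Dict String String) (k : String) (cyc : List String)
    (hc : CycF g k cyc) (O : List String) (hO : ClosedL g O) (x : String)
    (hx1 : x ∈ cyc) (hx2 : x ∈ O) : ∀ z ∈ cyc, z ∈ O := by
  obtain ⟨t, ht, rfl⟩ := List.getElem_of_mem hx1
  intro z hz
  obtain ⟨j, hj, rfl⟩ := List.getElem_of_mem hz
  have hlen := cyc_iter_len g k cyc hc
  have hadd : cyc.length = t + (cyc.length - t) := by omega
  have h1 : iterG g (cyc.length - t) (cyc[t]'ht) = some k := by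
    rw [hadd, iterG_add, cyc_iter g k cyc hc t ht] at hlen
    simpa using hlen
  have h2 : iterG g ((cyc.length - t) + j) (cyc[t]'ht) = some (cyc[j]'hj) := by
    rw [iterG_add, h1]
    simpa using cyc_iter g k cyc hc j hj
  obtain ⟨y, hy, hiter⟩ := iter_closed g O hO _ hx2 ((cyc.length - t) + j)
  rw [h2] at hiter
  have hyz := Option.some.inj hiter
  subst hyz
  exact hy

-- ---------- altCycGo characterization ----------

theorem lastD_cons (x : String) (l : List String) (h : l ≠ []) (d : String) :
    (x :: l).getLastD d = l.getLastD d := by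
  cases l with
  | nil => exact absurd rfl h
  | cons a t => simp

-- iterates are defined at every step below a defined one
theorem iter_isSome_of_le (g : PySem.Dict String String) (k y : String) (p j : Nat)
    (hj : j ≤ p) (h : iterG g p k = some y) : (iterG g j k).isSome := by
  have hadd : p = j + (p - j) := by omega
  rw [hadd, iterG_add] at h
  cases hjk : iterG g j k with
  | none => rw [hjk] at h; cases h
  | some z => simp

-- nodup of a first-return trajectory, given by positions
theorem firstret_nodup (g : PySem.Dict String String) (k : String) (p : Nat)
    (hp : 1 ≤ p) (hret : iterG g p k = some k)
    (hmin : ∀ m, 0 < m → m < p → iterG g m k ≠ some k)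
    (cyc : List String) (hlen : cyc.length = p)
    (helem : ∀ j (hj : j < cyc.length), iterG g j k = some (cyc[j]'hj)) : cyc.Nodup := by
  refine List.pairwise_iff_getElem.mpr ?_
  intro i j hi hj hij hEq
  have hij' : j < p := by omega
  have h1 : iterG g (p - j) (cyc[j]'hj) = some k := by
    have h := hret
    rw [show p = j + (p - j) by omega, iterG_add, helem j hj] at h
    simpa using h
  have h2 : iterG g (i + (p - j)) k = some k := by
    rw [iterG_add, helem i hi]
    show iterG g (p - j) (cyc[i]'hi) = some k
    exact hEq ▸ h1
  exact hmin (i + (p - j)) (by omega) (by omega) h2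

theorem altCycGo_succ (fuel : Nat) (g : PySem.Dict String String) (k u : String)
    (acc : List String) :
    altCycGo (fuel+1) g k u acc = match g.get? u with
      | none => none
      | some v => if v = k then some (acc ++ [u]) else altCycGo fuel g k v (acc ++ [u]) := rfl

theorem cycGo_master (g : PySem.Dict String String) (k : String) :
    ∀ (fuel : Nat) (u : String) (acc cyc : List String),
    altCycGo fuel g k u acc = some cyc →
    ∃ rest, cyc = acc ++ rest ∧ rest ≠ [] ∧ rest.headD "" = u ∧
      ChainL g rest ∧ g.get? (rest.getLastD "") = some k ∧
      (∀ x ∈ rest.tail, x ≠ k) := by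
  intro fuel
  induction fuel with
  | zero => intro u acc cyc h; cases h
  | succ fuel ih =>
    intro u acc cyc h
    rw [altCycGo_succ] at h
    cases hg : g.get? u with
    | none => rw [hg] at h; cases h
    | some v =>
      rw [hg] at h
      simp only at h
      by_cases hv : v = k
      · rw [if_pos hv] at h
        have hcyc := (Option.some.inj h)
        subst hcyc
        subst hv
        refine ⟨[u], rfl, by simp, rfl, ?_, by simpa using hg, by simp⟩
        intro i hi
        simp at hi
      · rw [if_neg hv] at h
        obtain ⟨rest, hr1, hr2, hr3, hr4, hr5, hr6⟩ := ih v (acc ++ [u]) cyc h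
        cases rest with
        | nil => exact absurd rfl hr2
        | cons a rt =>
          have ha : a = v := by simpa using hr3
          subst ha
          refine ⟨u :: a :: rt, by simpa using hr1, by simp, by simp, ?_, ?_, ?_⟩
          · intro i hlen
            cases i with
            | zero => simpa using hg
            | succ i =>
              simp only [List.getElem_cons_succ]
              exact hr4 i (by simpa using hlen)
          · rw [lastD_cons u (a :: rt) (by simp)]
            exact hr5
          · intro x hx
            rcases List.mem_cons.mp hx with rfl | hx2
            · exact hv
            · exact hr6 x hx2

theorem cycSome_props (g : PySem.Dict String String) (k : String) (cyc : List String)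
    (h : altCycleThrough g k = some cyc) : CycF g k cyc := by
  obtain ⟨rest, hr1, hr2, hr3, hr4, hr5, hr6⟩ := cycGo_master g k g.size k [] cyc h
  simp only [List.nil_append] at hr1
  subst hr1
  have hkeys : ∀ x ∈ cyc, x ∈ g.keys := by
    intro x hx
    obtain ⟨j, hj, rfl⟩ := List.getElem_of_mem hx
    by_cases hj1 : j + 1 < cyc.length
    · exact mem_keys_of_get?_some g _ _ (hr4 j hj1)
    · have hj' : j = cyc.length - 1 := by omega
      subst hj'
      have hw := hr5
      rw [lastD_eq_getElem _ hr2] at hw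
      exact mem_keys_of_get?_some g _ _ hw
  have helem : ∀ j (hj : j < cyc.length), iterG g j k = some (cyc[j]'hj) := by
    intro j hj
    have hh := chain_iter g cyc hr4 j hj
    rwa [hr3] at hh
  have hret : iterG g cyc.length k = some k := by
    have h0 : 0 < cyc.length := List.length_pos_of_ne_nil hr2
    rw [show cyc.length = (cyc.length - 1) + 1 by omega, iterG_succ_right,
      helem (cyc.length - 1) (by omega)]
    have hw := hr5
    rw [lastD_eq_getElem _ hr2] at hw
    simpa using hw
  have hmin : ∀ m, 0 < m → m < cyc.length → iterG g m k ≠ some k := by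
    intro m hm0 hm1 hEq
    have he := helem m hm1
    rw [hEq] at he
    have hkm : cyc[m]'hm1 = k := (Option.some.inj he).symm
    have hmem : cyc[m]'hm1 ∈ cyc.tail := by
      have htl : cyc.tail[m-1]'(by simp [List.length_tail]; omega) = cyc[m]'hm1 := by
        rw [List.getElem_tail]
        congr 1
        omega
      rw [← htl]
      exact List.getElem_mem _
    exact hr6 _ hmem hkm
  have hnodup := firstret_nodup g k cyc.length (List.length_pos_of_ne_nil hr2) hret hmin
    cyc rfl helem
  exact ⟨hr2, hr3, hr4, hr5, hnodup, hkeys⟩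

theorem cycSome_cyclic (g : PySem.Dict String String) (k : String) (cyc : List String)
    (h : altCycleThrough g k = some cyc) : CyclicG g k := by
  have hc := cycSome_props g k cyc h
  exact ⟨cyc.length, List.length_pos_of_ne_nil hc.ne, cyc_iter_len g k cyc hc⟩

theorem cyc_isSome_of_cyclic (g : PySem.Dict String String) (k : String)
    (nd : g.keys.Nodup) (h : CyclicG g k) : (altCycleThrough g k).isSome := by
  have hex : ∃ p, 0 < p ∧ iterG g p k = some k := by
    obtain ⟨p, h1, h2⟩ := h
    exact ⟨p, h1, h2⟩
  have hp := Nat.find_spec hex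
  set p := Nat.find hex with hpdef
  have hsome : ∀ j, j ≤ p → (iterG g j k).isSome :=
    fun j hj => iter_isSome_of_le g k k p j hj hp.2
  have hlenl : ((List.range p).map (fun j => (iterG g j k).getD "")).length = p := by simp
  have helem : ∀ j (hj : j < ((List.range p).map (fun j => (iterG g j k).getD "")).length),
      iterG g j k = some (((List.range p).map (fun j => (iterG g j k).getD ""))[j]'hj) := by
    intro j hj
    have hj' : j < p := by simpa using hj
    obtain ⟨y, hy⟩ := Option.isSome_iff_exists.mp (hsome j (by omega))
    simp [hy, hj']
  have hmin' : ∀ m, 0 < m → m < p → iterG g m k ≠ some k := by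
    intro m h1 h2 hEq
    exact Nat.find_min hex h2 ⟨h1, hEq⟩
  have hnd := firstret_nodup g k p hp.1 hp.2 hmin' _ hlenl helem
  have hsub : ∀ x ∈ (List.range p).map (fun j => (iterG g j k).getD ""), x ∈ g.keys := by
    intro x hx
    obtain ⟨j, hj, rfl⟩ := List.getElem_of_mem hx
    have hs := hsome (j+1) (by simpa using hj)
    rw [iterG_succ_right, helem j hj] at hs
    obtain ⟨y, hy⟩ := Option.isSome_iff_exists.mp (by simpa using hs)
    have hx2 : ((List.range p).map (fun j => (iterG g j k).getD ""))[j]'hj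
        = (iterG g j k).getD "" := by simp
    rw [hx2]
    exact mem_keys_of_get?_some g _ _ hy
  have hple : p ≤ g.size := by
    have hll := (hnd.subperm (fun _ hx => hsub _ hx)).length_le
    rw [hlenl] at hll
    simpa [PySem.Dict.size, PySem.Dict.keys] using hll
  have main : ∀ fuel t u acc, iterG g t k = some u → t < p → p - t ≤ fuel →
      (altCycGo fuel g k u acc).isSome := by
    intro fuel
    induction fuel with
    | zero => intro t u acc _ h2 h3; omega
    | succ fuel ih =>
      intro t u acc h1 h2 h3
      have hs := hsome (t+1) (by omega)
      rw [iterG_succ_right, h1] at hs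
      obtain ⟨v, hv⟩ := Option.isSome_iff_exists.mp (by simpa using hs)
      rw [altCycGo_succ, hv]
      simp only
      by_cases hvk : v = k
      · rw [if_pos hvk]; rfl
      · rw [if_neg hvk]
        have hit : iterG g (t+1) k = some v := by
          rw [iterG_succ_right, h1]
          simpa using hv
        have ht1 : t + 1 < p := by
          rcases Nat.lt_or_ge (t+1) p with hlt | hge
          · exact hlt
          · exfalso
            have heq : t + 1 = p := by omega
            rw [heq, hp.2] at hit
            exact hvk (Option.some.inj hit).symm
        exact ih (t+1) v (acc ++ [u]) hit ht1 (by omega)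
  exact main g.size 0 k [] rfl hp.1 (by omega)

theorem cycGo_congr (g g' : PySem.Dict String String) (k : String) (cyc : List String) :
    ∀ (fuel fuel' : Nat) (u : String) (acc : List String),
    altCycGo fuel g k u acc = some cyc →
    (∀ x ∈ cyc, g'.get? x = g.get? x) →
    cyc.length ≤ fuel' + acc.length →
    altCycGo fuel' g' k u acc = some cyc := by
  intro fuel
  induction fuel with
  | zero => intro fuel' u acc h; exact fun _ _ => absurd h (by simp [altCycGo])
  | succ fuel ih =>
    intro fuel' u acc h hag hle
    obtain ⟨rest, hr1, hr2, hr3, -, -, -⟩ := cycGo_master g k (fuel+1) u acc cyc h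
    have hu : u ∈ cyc := by
      subst hr1
      cases rest with
      | nil => exact absurd rfl hr2
      | cons a rt =>
        have ha : a = u := by simpa using hr3
        subst ha
        exact List.mem_append_right _ (List.mem_cons_self ..)
    have hlcyc : acc.length + rest.length = cyc.length := by
      subst hr1; simp
    have hrl : 1 ≤ rest.length := by
      cases rest with
      | nil => exact absurd rfl hr2
      | cons a rt => simp
    rw [altCycGo_succ] at h
    cases hg : g.get? u with
    | none => rw [hg] at h; cases h
    | some v =>
      rw [hg] at h
      simp only at h
      cases fuel' with
      | zero => omega
      | succ f' =>
        rw [altCycGo_succ, hag u hu, hg]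
        simp only
        by_cases hvk : v = k
        · rw [if_pos hvk] at h ⊢
          exact h
        · rw [if_neg hvk] at h ⊢
          exact ih f' v (acc ++ [u]) h hag (by simp; omega)


-- nodup lists with same members have equal length of equal filters etc.
theorem nodup_length_le (l l' : List String) (h : l.Nodup) (hs : ∀ x ∈ l, x ∈ l') :
    l.length ≤ l'.length :=
  (h.subperm (fun _ hx => hs _ hx)).length_le

-- purity as a proposition
theorem isPure_iff (g : PySem.Dict String String) (cyc : List String) :
    altIsPure g cyc = true ↔ ∀ p ∈ g.items, p.2 ∈ cyc → p.1 ∈ cyc := by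
  unfold altIsPure
  simp [List.all_eq_true, List.mem_filter, PySem.Set.mem_ofList]
  constructor
  · intro H a b hab hb
    rcases H a b hab with h1 | h2
    · exact absurd hb h1
    · exact h2
  · intro H a b hab
    by_cases hb : b ∈ cyc
    · exact Or.inr (H a b hab hb)
    · exact Or.inl hb

-- ---------- transfer of a key's rep-status to the restricted dict ----------

theorem cyc_transfer (g : PySem.Dict String String) (D : List String) (nd : g.keys.Nodup)
    (k : String) (cyc : List String) (h : altCycleThrough g k = some cyc)
    (hdisj : ∀ x ∈ cyc, x ∉ D) :
    altCycleThrough (restrictOut g D) k = some cyc := by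
  have hc := cycSome_props g k cyc h
  have hag : ∀ x ∈ cyc, (restrictOut g D).get? x = g.get? x := by
    intro x hx
    rw [get?_restrictOut, if_neg (hdisj x hx)]
  have hsub : ∀ x ∈ cyc, x ∈ (restrictOut g D).keys := by
    intro x hx
    rw [keys_restrictOut]
    refine List.mem_filter.mpr ⟨hc.keys x hx, by simpa using hdisj x hx⟩
  have hlen : cyc.length ≤ (restrictOut g D).size := by
    have hl := nodup_length_le cyc _ hc.nodup hsub
    simpa [PySem.Dict.size, PySem.Dict.keys] using hl
  exact cycGo_congr g (restrictOut g D) k cyc g.size (restrictOut g D).size k [] h hag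
    (by simpa using hlen)

theorem rep_transfer (g : PySem.Dict String String) (D : List String) (nd : g.keys.Nodup)
    (k : String) (hkD : k ∉ D)
    (hdisj : ∀ cyc, altCycleThrough g k = some cyc → ∀ x ∈ cyc, x ∉ D)
    (hedge : ∀ cyc, altCycleThrough g k = some cyc →
      ∀ p ∈ g.items, p.1 ∈ D → p.2 ∉ cyc) :
    altRep (restrictOut g D) k = altRep g k := by
  cases h : altCycleThrough g k with
  | none =>
    have hn : altCycleThrough (restrictOut g D) k = none := by
      cases h' : altCycleThrough (restrictOut g D) k with
      | none => rfl
      | some cyc' =>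
        exfalso
        obtain ⟨p, hp1, hp2⟩ := cycSome_cyclic _ k cyc' h'
        have hg : iterG g p k = some k := by
          refine iterG_mono g (restrictOut g D) ?_ p k k hp2
          intro x y hxy
          rw [get?_restrictOut] at hxy
          by_cases hxD : x ∈ D
          · rw [if_pos hxD] at hxy; cases hxy
          · rwa [if_neg hxD] at hxy
        have hS := cyc_isSome_of_cyclic g k nd ⟨p, hp1, hg⟩
        rw [h] at hS
        simp at hS
    unfold altRep
    rw [h, hn]
  | some cyc =>
    have ht := cyc_transfer g D nd k cyc h (hdisj cyc h)
    have hpure : altIsPure (restrictOut g D) cyc = altIsPure g cyc := by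
      rw [Bool.eq_iff_iff, isPure_iff, isPure_iff]
      constructor
      · intro H p hpg hpv
        by_cases hpD : p.1 ∈ D
        · exact absurd hpv (hedge cyc h p hpg hpD)
        · have hp' : p ∈ (restrictOut g D).items := by
            rw [items_restrictOut]
            exact List.mem_filter.mpr ⟨hpg, by simpa using hpD⟩
          exact H p hp' hpv
      · intro H p hp' hpv
        have hpg : p ∈ g.items := by
          rw [items_restrictOut] at hp'
          exact (List.mem_filter.mp hp').1
        exact H p hpg hpv
    unfold altRep
    rw [h, ht]
    simp only [hpure]

-- ---------- pigeonhole: no sources ⇒ values are a permutation of keys ----------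

theorem nosource_perm (g : PySem.Dict String String) (nd : g.keys.Nodup)
    (h : ∀ k ∈ g.keys, k ∈ g.values) : g.values.Nodup ∧ ∀ v ∈ g.values, v ∈ g.keys := by
  have hsub : g.keys ⊆ g.values := fun x hx => h x hx
  have hlen : g.values.length ≤ g.keys.length := by
    simp [PySem.Dict.keys, PySem.Dict.values]
  have hperm : g.keys.Perm g.values := (nd.subperm hsub).perm_of_length_le hlen
  exact ⟨hperm.nodup nd, fun v hv => hperm.symm.subset hv⟩

-- ---------- the walk characterization ----------

theorem solveWalk_succ (fuel : Nat) (g : PySem.Dict String String) (path : List String)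
    (cur : String) :
    solveWalk (fuel+1) g path cur = if path.contains cur then (g, path, cur)
      else match g.pop? cur with
        | none => (g, path ++ [cur], cur)
        | some (nxt, g') => solveWalk fuel g' (path ++ [cur]) nxt := rfl

theorem walkStop (fuel : Nat) (g : PySem.Dict String String) (path : List String) (cur : String)
    (h : cur ∈ path) : solveWalk fuel g path cur = (g, path, cur) := by
  cases fuel <;> simp [solveWalk, h]

theorem nodup_append_singleton (l : List String) (c : String) (h1 : l.Nodup) (h2 : c ∉ l) :
    (l ++ [c]).Nodup := by
  refine List.Nodup.append h1 (List.nodup_singleton c) ?_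
  intro a ha hc
  rw [List.mem_singleton] at hc
  exact h2 (hc ▸ ha)

theorem walk_spec : ∀ (fuel : Nat) (g : PySem.Dict String String) (path : List String)
    (cur : String), g.keys.Nodup → path.Nodup → cur ∉ path → (∀ x ∈ path, x ∈ g.keys) →
    g.size - path.length < fuel →
    ∃ ext : List String, ext ≠ [] ∧ ext.headD "" = cur ∧ (path ++ ext).Nodup ∧
      ChainL g ext ∧
      ( (g.get? (ext.getLastD "") = none ∧
          solveWalk fuel (restrictOut g path) path cur
            = (restrictOut g (path ++ ext.dropLast), path ++ ext, ext.getLastD ""))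
        ∨ (∃ c, g.get? (ext.getLastD "") = some c ∧ c ∈ path ++ ext ∧
          solveWalk fuel (restrictOut g path) path cur
            = (restrictOut g (path ++ ext), path ++ ext, c)) ) := by
  intro fuel
  induction fuel with
  | zero => intro g path cur _ _ _ _ hf; omega
  | succ fuel ih =>
    intro g path cur nd ndp hcp hpk hf
    have hcontains : path.contains cur = false := by simpa using hcp
    have hpop : (restrictOut g path).pop? cur
        = (g.get? cur).map (fun v => (v, (restrictOut g path).erase cur)) := by
      unfold PySem.Dict.pop?
      rw [get?_restrictOut, if_neg hcp]
    cases hg : g.get? cur with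
    | none =>
      refine ⟨[cur], by simp, rfl, nodup_append_singleton path cur ndp hcp, ?_,
        Or.inl ⟨by simpa using hg, ?_⟩⟩
      · intro i hi; simp at hi
      · rw [solveWalk_succ, hcontains]
        simp only [Bool.false_eq_true, if_false, hpop, hg, Option.map_none]
        simp
    | some v =>
      have hchain1 : ∀ (ext' : List String), ext' ≠ [] → ext'.headD "" = v → ChainL g ext' →
          ChainL g (cur :: ext') := by
        intro ext' hne hhd hch i hlen
        cases i with
        | zero =>
          simp only [List.getElem_cons_zero, List.getElem_cons_succ]
          rw [show ext'[0]'(List.length_pos_of_ne_nil hne) = ext'.headD "" from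
            (headD_eq_getElem ext' hne "").symm, hhd]
          exact hg
        | succ i =>
          simp only [List.getElem_cons_succ]
          exact hch i (by simpa using hlen)
      have hstep : solveWalk (fuel+1) (restrictOut g path) path cur
          = solveWalk fuel (restrictOut g (path ++ [cur])) (path ++ [cur]) v := by
        rw [solveWalk_succ, hcontains]
        simp only [Bool.false_eq_true, if_false, hpop, hg, Option.map_some]
        rw [erase_restrictOut]
      by_cases hv : v ∈ path ++ [cur]
      · refine ⟨[cur], by simp, rfl, nodup_append_singleton path cur ndp hcp, ?_,
          Or.inr ⟨v, by simpa using hg, by simpa using hv, ?_⟩⟩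
        · intro i hi; simp at hi
        · rw [hstep, walkStop _ _ _ _ hv]
      · have hck : cur ∈ g.keys := mem_keys_of_get?_some g _ _ hg
        have hpk' : ∀ x ∈ path ++ [cur], x ∈ g.keys := by
          intro x hx
          rcases List.mem_append.mp hx with hx1 | hx2
          · exact hpk x hx1
          · rw [List.mem_singleton.mp hx2]; exact hck
        have hlen1 : (path ++ [cur]).length ≤ g.size := by
          have := nodup_length_le (path ++ [cur]) g.keys
            (nodup_append_singleton path cur ndp hcp) hpk'
          simpa [PySem.Dict.size, PySem.Dict.keys] using this
        have hf' : g.size - (path ++ [cur]).length < fuel := by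
          simp only [List.length_append, List.length_cons, List.length_nil] at hlen1 ⊢
          omega
        obtain ⟨ext', he1, he2, he3, he4, he5⟩ := ih g (path ++ [cur]) v nd
          (nodup_append_singleton path cur ndp hcp) hv hpk' hf'
        refine ⟨cur :: ext', by simp, rfl, by simpa [List.append_assoc] using he3,
          hchain1 ext' he1 he2 he4, ?_⟩
        have hlast : (cur :: ext').getLastD "" = ext'.getLastD "" := lastD_cons _ _ he1 _
        rcases he5 with ⟨hn1, hn2⟩ | ⟨c, hs1, hs2, hs3⟩
        · left
          refine ⟨by rwa [hlast], ?_⟩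
          rw [hstep, hn2, List.dropLast_cons_of_ne_nil he1, hlast]
          simp [List.append_assoc]
        · right
          refine ⟨c, by rwa [hlast], by simpa [List.append_assoc] using hs2, ?_⟩
          rw [hstep, hs3]
          simp [List.append_assoc]


-- ---------- mid-level helpers for the delta lemma ----------

-- Prop-conditioned counting loop
theorem countIf_foldl_prop {α : Type} (l : List α) (p : α → Prop) [DecidablePred p] (a : Int) :
    l.foldl (fun a x => if p x then a + 1 else a) a
      = a + ((l.filter (fun x => decide (p x))).length : Int) := by
  induction l generalizing a with
  | nil => simp
  | cons x t ih =>
    by_cases h : p x <;> simp [List.filter_cons, h, ih] <;> push_cast <;> ring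

-- split a filter count along a second predicate
theorem length_filter_split {α : Type} (l : List α) (p q : α → Bool) :
    (l.filter p).length
      = ((l.filter q).filter p).length + ((l.filter (fun x => !q x)).filter p).length := by
  induction l with
  | nil => simp
  | cons x t ih =>
    by_cases hq : q x = true <;> by_cases hp : p x = true <;>
      simp [List.filter_cons, hq, hp, ih] <;> omega

-- moves as a count over keys
theorem altMoves_eq (g : PySem.Dict String String) (nd : g.keys.Nodup) :
    altMoves g = ((g.keys.filter (fun k => decide (g.getD k "" ≠ k))).length : Int) := by
  unfold altMoves
  rw [countIf_foldl_prop g.items (fun p => p.2 ≠ p.1) 0]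
  rw [PySem.Dict.items_eq_map_keys g nd ""]
  rw [List.filter_map]
  simp only [List.length_map, Function.comp_def]
  norm_num

-- bonus as a count over keys
theorem altBonus_eq (g : PySem.Dict String String) :
    altBonus g = ((g.keys.filter (altRep g)).length : Int) := by
  unfold altBonus
  rw [countIf_foldl_str g.keys (altRep g) 0]
  norm_num

-- getD is unchanged on surviving keys
theorem getD_restrictOut_of_not_mem (g : PySem.Dict String String) (D : List String)
    (k : String) (hk : k ∉ D) : (restrictOut g D).getD k "" = g.getD k "" := by
  rw [PySem.Dict.getD_eq_get?_getD, PySem.Dict.getD_eq_get?_getD, get?_restrictOut, if_neg hk]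

-- keys of g that lie in D are a permutation of D
theorem keys_inter_perm (g : PySem.Dict String String) (D : List String) (nd : g.keys.Nodup)
    (ndD : D.Nodup) (hD : ∀ x ∈ D, x ∈ g.keys) :
    (g.keys.filter (fun x => D.contains x)).Perm D := by
  rw [List.perm_ext_iff_of_nodup (nd.filter _) ndD]
  intro a
  simp only [List.mem_filter]
  constructor
  · rintro ⟨-, h2⟩
    simpa using h2
  · intro h
    exact ⟨hD a h, by simpa using h⟩

theorem size_keys (g : PySem.Dict String String) : g.size = g.keys.length := by
  simp [PySem.Dict.size, PySem.Dict.keys]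

-- moves decomposition along a removed key set
theorem moves_decomp (g : PySem.Dict String String) (D : List String) (nd : g.keys.Nodup)
    (ndD : D.Nodup) (hD : ∀ x ∈ D, x ∈ g.keys) :
    altMoves g = ((D.filter (fun k => decide (g.getD k "" ≠ k))).length : Int)
      + altMoves (restrictOut g D) := by
  rw [altMoves_eq g nd, altMoves_eq _ (nodup_keys_restrictOut g D nd)]
  rw [length_filter_split g.keys (fun k => decide (g.getD k "" ≠ k)) (fun x => D.contains x)]
  have h1 : ((g.keys.filter (fun x => D.contains x)).filter
      (fun k => decide (g.getD k "" ≠ k))).length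
      = (D.filter (fun k => decide (g.getD k "" ≠ k))).length :=
    (((keys_inter_perm g D nd ndD hD)).filter _).length_eq
  have h2 : ((g.keys.filter (fun x => !(D.contains x))).filter
      (fun k => decide (g.getD k "" ≠ k))).length
      = ((restrictOut g D).keys.filter
        (fun k => decide ((restrictOut g D).getD k "" ≠ k))).length := by
    rw [keys_restrictOut]
    congr 1
    apply List.filter_congr
    intro x hx
    have hxD : x ∉ D := by simpa using (List.mem_filter.mp hx).2
    rw [getD_restrictOut_of_not_mem g D x hxD]
  rw [h1, h2]
  push_cast
  ring

-- bonus decomposition along a removed key set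
theorem bonus_decomp (g : PySem.Dict String String) (D : List String) (nd : g.keys.Nodup)
    (ndD : D.Nodup) (hD : ∀ x ∈ D, x ∈ g.keys)
    (htr : ∀ k ∈ g.keys, k ∉ D → altRep (restrictOut g D) k = altRep g k) :
    altBonus g = ((D.filter (altRep g)).length : Int) + altBonus (restrictOut g D) := by
  rw [altBonus_eq g, altBonus_eq _]
  rw [length_filter_split g.keys (altRep g) (fun x => D.contains x)]
  have h1 : ((g.keys.filter (fun x => D.contains x)).filter (altRep g)).length
      = (D.filter (altRep g)).length :=
    (((keys_inter_perm g D nd ndD hD)).filter _).length_eq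
  have h2 : ((g.keys.filter (fun x => !(D.contains x))).filter (altRep g)).length
      = ((restrictOut g D).keys.filter (altRep (restrictOut g D))).length := by
    rw [keys_restrictOut]
    apply congrArg
    apply List.filter_congr
    intro x hx
    have hm := List.mem_filter.mp hx
    exact (htr x hm.1 (by simpa using hm.2)).symm
  rw [h1, h2]
  push_cast
  ring

-- size after removal
theorem size_restrictOut (g : PySem.Dict String String) (D : List String) (nd : g.keys.Nodup)
    (ndD : D.Nodup) (hD : ∀ x ∈ D, x ∈ g.keys) :
    (restrictOut g D).size + D.length = g.size := by
  rw [size_keys, size_keys, keys_restrictOut]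
  have hsplit := length_filter_split g.keys (fun _ => true) (fun x => D.contains x)
  simp only [List.filter_true] at hsplit
  have h1 : (g.keys.filter (fun x => D.contains x)).length = D.length :=
    (keys_inter_perm g D nd ndD hD).length_eq
  omega

-- adjacent elements of a nodup list differ
theorem nodup_adjacent_ne (P : List String) (nd : P.Nodup) (j : Nat) (hj : j + 1 < P.length) :
    P[j]'(by omega) ≠ P[j+1]'hj := by
  have := List.pairwise_iff_getElem.mp nd j (j+1) (by omega) hj (by omega)
  exact this

-- no closed set meets a chain that runs into a sink
theorem sink_no_closed (g : PySem.Dict String String) (P : List String) (hch : ChainL g P)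
    (hne : P ≠ []) (hlast : g.get? (P.getLastD "") = none) :
    ∀ O, ClosedL g O → ∀ x ∈ O, x ∉ P := by
  intro O hO x hxO hxP
  obtain ⟨j, hj, rfl⟩ := List.getElem_of_mem hxP
  have hstep : ∀ m (hm2 : j + m < P.length), P[j+m]'hm2 ∈ O := by
    intro m
    induction m with
    | zero => intro h; simpa using hxO
    | succ m ihm =>
      intro h
      have hm : j + m < P.length := by omega
      obtain ⟨y, hyO, hy⟩ := hO _ (ihm hm)
      have hc := hch (j+m) (by omega)
      rw [hc] at hy
      have h2 := Option.some.inj hy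
      have hidx2 : P[j+(m+1)]'h = P[j+m+1]'(by omega) := by
        congr 1
      rw [hidx2, h2]
      exact hyO
  have hlastO : P[P.length - 1]'(by have := List.length_pos_of_ne_nil hne; omega) ∈ O := by
    have := hstep (P.length - 1 - j) (by omega)
    have hidx : j + (P.length - 1 - j) = P.length - 1 := by omega
    simp only [hidx] at this
    exact this
  obtain ⟨y, -, hy⟩ := hO _ hlastO
  rw [lastD_eq_getElem _ hne] at hlast
  rw [hlast] at hy
  cases hy

-- from any chain element, a closed set reaches the wrap target
theorem chain_march (g : PySem.Dict String String) (P : List String) (c : String)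
    (hch : ChainL g P) (hne : P ≠ []) (hwrap : g.get? (P.getLastD "") = some c) :
    ∀ O, ClosedL g O → ∀ j (hj : j < P.length), P[j]'hj ∈ O → c ∈ O := by
  intro O hO j hj hxO
  have hstep : ∀ m (hm2 : j + m < P.length), P[j+m]'hm2 ∈ O := by
    intro m
    induction m with
    | zero => intro h; simpa using hxO
    | succ m ihm =>
      intro h
      have hm : j + m < P.length := by omega
      obtain ⟨y, hyO, hy⟩ := hO _ (ihm hm)
      have hc := hch (j+m) (by omega)
      rw [hc] at hy
      have h2 := Option.some.inj hy
      have hidx2 : P[j+(m+1)]'h = P[j+m+1]'(by omega) := by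
        congr 1
      rw [hidx2, h2]
      exact hyO
  have hlastO : P[P.length - 1]'(by have := List.length_pos_of_ne_nil hne; omega) ∈ O := by
    have := hstep (P.length - 1 - j) (by omega)
    have hidx : j + (P.length - 1 - j) = P.length - 1 := by omega
    simp only [hidx] at this
    exact this
  obtain ⟨y, hyO, hy⟩ := hO _ hlastO
  rw [lastD_eq_getElem _ hne] at hwrap
  rw [hwrap] at hy
  have h3 := Option.some.inj hy
  rw [h3]
  exact hyO

-- every element of a cycle list is cyclic with the same period
theorem cycle_iter_all (g : PySem.Dict String String) (c : String) (P : List String)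
    (hc : CycF g c P) (j : Nat) (hj : j < P.length) :
    iterG g P.length (P[j]'hj) = some (P[j]'hj) := by
  have h1 := cyc_iter_len g c P hc
  have h2 := cyc_iter g c P hc j hj
  have h3 : iterG g (j + P.length) c = some (P[j]'hj) := by
    rw [show j + P.length = P.length + j by omega, iterG_add, h1]
    simpa using h2
  rw [iterG_add, h2] at h3
  simpa using h3

-- characterization of min? with the identity key
theorem min?_id_iff (xs : List String) (hne : xs ≠ []) (m : String) :
    PySem.List.min? xs (fun x => x) = some m ↔ m ∈ xs ∧ ∀ y ∈ xs, m ≤ y := by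
  constructor
  · intro h
    exact ⟨PySem.List.min?_mem h, PySem.List.min?_isMin h⟩
  · rintro ⟨hm, hall⟩
    cases h : PySem.List.min? xs (fun x => x) with
    | none => exact absurd ((PySem.List.min?_eq_none_iff xs _).mp h) hne
    | some m' =>
      have h1 : m' ∈ xs := PySem.List.min?_mem h
      have h2 := PySem.List.min?_isMin h
      have : m' = m := le_antisymm (h2 m hm) (hall m' h1)
      rw [this]

theorem headD_mem (l : List String) (h : l ≠ []) : l.headD "" ∈ l := by
  cases l with
  | nil => exact absurd rfl h
  | cons a t => exact List.mem_cons_self ..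

theorem lastD_mem (l : List String) (h : l ≠ []) : l.getLastD "" ∈ l := by
  rw [lastD_eq_getElem _ h]
  exact List.getElem_mem _

theorem cyc_head_mem (g : PySem.Dict String String) (k : String) (cyc : List String)
    (hc : CycF g k cyc) : k ∈ cyc := by
  rw [← hc.head]
  exact headD_mem cyc hc.ne

-- the tail segment of a revisit walk is a cycle list
theorem drop_cycF (g : PySem.Dict String String) (P : List String) (i : Nat)
    (hi : i < P.length) (hPnd : P.Nodup) (hPch : ChainL g P) (hPne : P ≠ [])
    (hwrap : g.get? (P.getLastD "") = some (P[i]'hi)) : CycF g (P[i]'hi) (P.drop i) := by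
  have hlen : (P.drop i).length = P.length - i := List.length_drop
  have hdne : P.drop i ≠ [] := by
    intro h
    rw [← List.length_eq_zero_iff, hlen] at h
    omega
  refine ⟨hdne, ?_, ?_, ?_, hPnd.sublist (List.drop_sublist i P), ?_⟩
  · rw [headD_eq_getElem _ hdne, List.getElem_drop]
    simp
  · intro t ht
    rw [List.getElem_drop, List.getElem_drop]
    have h2 : i + t + 1 < P.length := by
      rw [hlen] at ht
      omega
    have hc := hPch (i+t) h2
    simp only [show i + (t+1) = i + t + 1 from by omega]
    exact hc
  · rw [lastD_eq_getElem _ hdne]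
    have hidx : (P.drop i)[(P.drop i).length - 1]'(by
        have := List.length_pos_of_ne_nil hdne; omega)
        = P[P.length - 1]'(by have := List.length_pos_of_ne_nil hPne; omega) := by
      rw [List.getElem_drop]
      congr 1
      rw [hlen]
      omega
    rw [hidx, ← lastD_eq_getElem _ hPne]
    exact hwrap
  · intro x hx
    obtain ⟨t, ht, rfl⟩ := List.getElem_of_mem hx
    by_cases ht1 : t + 1 < (P.drop i).length
    · have h2 : i + t + 1 < P.length := by
        rw [hlen] at ht1
        omega
      have hc := hPch (i+t) h2
      rw [List.getElem_drop]
      exact mem_keys_of_get?_some g _ _ hc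
    · have hteq : (P.drop i)[t]'ht = P.getLastD "" := by
        rw [List.getElem_drop, lastD_eq_getElem _ hPne]
        congr 1
        rw [hlen] at ht ht1
        omega
      rw [hteq]
      exact mem_keys_of_get?_some g _ _ hwrap

-- a revisit walk removes no vertex of any surviving cycle
theorem revisit_disj (g : PySem.Dict String String) (P : List String) (i : Nat)
    (hi : i < P.length) (hPnd : P.Nodup) (hPch : ChainL g P) (hPne : P ≠ [])
    (hwrap : g.get? (P.getLastD "") = some (P[i]'hi)) :
    ∀ k, k ∉ P → ∀ cyc, altCycleThrough g k = some cyc → ∀ x ∈ cyc, x ∉ P := by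
  intro k hkP cyc hck x hxc hxP
  have hprops := cycSome_props g k cyc hck
  have hclosed := cyc_closed g k cyc hprops
  obtain ⟨j, hj, rfl⟩ := List.getElem_of_mem hxP
  have hcmem : (P[i]'hi) ∈ cyc :=
    chain_march g P (P[i]'hi) hPch hPne hwrap cyc hclosed j hj hxc
  have hCyc := drop_cycF g P i hi hPnd hPch hPne hwrap
  have hCclosed := cyc_closed g _ _ hCyc
  have h0 : (P.drop i)[0]'(by rw [List.length_drop]; omega) = P[i]'(by omega) := by
    rw [List.getElem_drop]
    simp
  have hmemC : (P[i]'hi) ∈ P.drop i := by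
    rw [← h0]
    exact List.getElem_mem _
  have hsub : ∀ z ∈ cyc, z ∈ P.drop i :=
    orbit_sub g k cyc hprops (P.drop i) hCclosed (P[i]'hi) hcmem hmemC
  exact hkP ((List.drop_sublist i P).subset (hsub k (cyc_head_mem g k cyc hprops)))

-- values of removed keys stay inside the removed path
theorem revisit_edge (g : PySem.Dict String String) (P : List String) (i : Nat)
    (hi : i < P.length) (nd : g.keys.Nodup) (hPch : ChainL g P) (hPne : P ≠ [])
    (hwrap : g.get? (P.getLastD "") = some (P[i]'hi)) :
    ∀ p ∈ g.items, p.1 ∈ P → p.2 ∈ P := by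
  intro p hp hp1
  obtain ⟨a, b⟩ := p
  simp only at hp1 ⊢
  obtain ⟨j, hj, hj2⟩ := List.getElem_of_mem hp1
  have hget : g.get? a = some b := PySem.Dict.get?_of_mem_items g hp nd
  by_cases hj1 : j + 1 < P.length
  · have hc := hPch j hj1
    rw [← hj2, hc] at hget
    rw [← Option.some.inj hget]
    exact List.getElem_mem _
  · have ha : a = P.getLastD "" := by
      rw [← hj2, lastD_eq_getElem _ hPne]
      congr 1
      omega
    rw [ha, hwrap] at hget
    rw [← Option.some.inj hget]
    exact List.getElem_mem _

-- ---------- the outer-iteration core lemma ----------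

theorem altRep_some (g : PySem.Dict String String) (k : String) (cyc : List String)
    (h : altCycleThrough g k = some cyc) :
    altRep g k = (decide (2 ≤ cyc.length) && (PySem.List.min? cyc (fun x => x) == some k)
      && altIsPure g cyc) := by
  unfold altRep
  rw [h]

theorem altRep_none (g : PySem.Dict String String) (k : String)
    (h : altCycleThrough g k = none) : altRep g k = false := by
  unfold altRep
  rw [h]

-- the heart: one outer iteration from start s preserves count + moves + bonus
theorem iter_delta' (g : PySem.Dict String String) (nd : g.keys.Nodup) (s : String)
    (hs : s ∈ g.keys) (hsrc : s ∉ g.values ∨ ∀ k ∈ g.keys, k ∈ g.values) (count : Int) :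
    ∃ g' : PySem.Dict String String, g'.keys.Nodup ∧ g'.size < g.size ∧
      (solveWalk (g.size+1) g [] s).1 = g' ∧
      solveClassify count (solveWalk (g.size+1) g [] s).2.1 (solveWalk (g.size+1) g [] s).2.2
        + altMoves g' + altBonus g' = count + altMoves g + altBonus g := by
  obtain ⟨P, hPne, hPhead, hPnd0, hPch, hcase⟩ := walk_spec (g.size+1) g [] s nd
    (by simp) (by simp) (by simp) (by simp)
  rw [restrictOut_nil] at hcase
  simp only [List.nil_append] at hPnd0 hcase
  have hPnd : P.Nodup := hPnd0
  have hlp : 0 < P.length := List.length_pos_of_ne_nil hPne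
  rcases hcase with ⟨hlast, hwalk⟩ | ⟨c, hlastc, hcP, hwalk⟩
  · -- ===== SINK case =====
    have hlen2 : 2 ≤ P.length := by
      by_contra hcon
      have h1 : P.length = 1 := by omega
      have hPs : P.getLastD "" = s := by
        rw [lastD_eq_getElem _ hPne, ← hPhead, headD_eq_getElem _ hPne]
        congr 1
        omega
      rw [hPs] at hlast
      have hS := get?_isSome_of_mem_keys g s hs
      rw [hlast] at hS
      simp at hS
    have hDP : ∀ x ∈ P.dropLast, x ∈ P := fun x hx => (List.dropLast_sublist P).subset hx
    have hDelem : ∀ x ∈ P.dropLast, ∃ j : Nat, ∃ hj : j + 1 < P.length, P[j]'(by omega) = x := by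
      intro x hx
      obtain ⟨j, hj, hjx⟩ := List.getElem_of_mem hx
      have hj' : j + 1 < P.length := by
        have hdl : P.dropLast.length = P.length - 1 := by simp
        omega
      exact ⟨j, hj', by rw [← hjx, List.getElem_dropLast]⟩
    have hDkeys : ∀ x ∈ P.dropLast, x ∈ g.keys := by
      intro x hx
      obtain ⟨j, hj, rfl⟩ := hDelem x hx
      exact mem_keys_of_get?_some g _ _ (hPch j hj)
    have hDnd : P.dropLast.Nodup := hPnd.sublist (List.dropLast_sublist P)
    have hnoc := sink_no_closed g P hPch hPne hlast
    have htr : ∀ k ∈ g.keys, k ∉ P.dropLast →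
        altRep (restrictOut g P.dropLast) k = altRep g k := by
      intro k _ hkD
      refine rep_transfer g P.dropLast nd k hkD ?_ ?_
      · intro cyc hck x hxc hxD
        exact hnoc cyc (cyc_closed g k cyc (cycSome_props g k cyc hck)) x hxc (hDP x hxD)
      · intro cyc hck p hp hpD hpc
        obtain ⟨j, hj, hjx⟩ := hDelem p.1 hpD
        have hget : g.get? p.1 = some p.2 := by
          obtain ⟨a, b⟩ := p
          exact PySem.Dict.get?_of_mem_items g hp nd
        rw [← hjx, hPch j hj] at hget
        have hp2 : p.2 = P[j+1]'hj := (Option.some.inj hget).symm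
        exact hnoc cyc (cyc_closed g k cyc (cycSome_props g k cyc hck)) p.2 hpc
          (hp2 ▸ List.getElem_mem _)
    have hrepD : ∀ k ∈ P.dropLast, altRep g k = false := by
      intro k hk
      cases hck : altCycleThrough g k with
      | none => exact altRep_none g k hck
      | some cyc =>
        exfalso
        have hprops := cycSome_props g k cyc hck
        exact hnoc cyc (cyc_closed g k cyc hprops) k (cyc_head_mem g k cyc hprops) (hDP k hk)
    have hmovD : P.dropLast.filter (fun k => decide (g.getD k "" ≠ k)) = P.dropLast := by
      rw [List.filter_eq_self]
      intro x hx
      obtain ⟨j, hj, rfl⟩ := hDelem x hx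
      have hgd : g.getD (P[j]'(by omega)) "" = P[j+1]'hj :=
        PySem.Dict.getD_of_get?_eq_some _ _ (hPch j hj)
      simp only [hgd, decide_eq_true_eq]
      exact (nodup_adjacent_ne P hPnd j hj).symm
    have hbonD : P.dropLast.filter (altRep g) = [] := by
      rw [List.filter_eq_nil_iff]
      intro a ha
      simp [hrepD a ha]
    have hM := moves_decomp g P.dropLast nd hDnd hDkeys
    have hB := bonus_decomp g P.dropLast nd hDnd hDkeys htr
    have hS := size_restrictOut g P.dropLast nd hDnd hDkeys
    have hDlen : P.dropLast.length = P.length - 1 := by simp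
    refine ⟨restrictOut g P.dropLast, nodup_keys_restrictOut g P.dropLast nd,
      by omega, by rw [hwalk], ?_⟩
    rw [hwalk]
    dsimp only
    have hclass : solveClassify count P (P.getLastD "") = count + (P.length : Int) - 1 := by
      unfold solveClassify
      rw [if_pos rfl]
    rw [hclass, hM, hB, hmovD, hbonD]
    simp only [List.length_nil]
    push_cast [hDlen]
    omega
  · -- ===== REVISIT case =====
    obtain ⟨i, hi, hci⟩ := List.getElem_of_mem hcP
    subst hci
    have hPkeys : ∀ x ∈ P, x ∈ g.keys := by
      intro x hx
      obtain ⟨j, hj, rfl⟩ := List.getElem_of_mem hx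
      by_cases hj1 : j + 1 < P.length
      · exact mem_keys_of_get?_some g _ _ (hPch j hj1)
      · have hjx : P[j]'hj = P.getLastD "" := by
          rw [lastD_eq_getElem _ hPne]
          congr 1
          omega
        rw [hjx]
        exact mem_keys_of_get?_some g _ _ hlastc
    have hCyc := drop_cycF g P i hi hPnd hPch hPne hlastc
    have hCcl := cyc_closed g _ _ hCyc
    have hc0 : (P[i]'hi) ∈ P.drop i := by
      have h0 : (P.drop i)[0]'(by rw [List.length_drop]; omega) = P[i]'hi := by
        rw [List.getElem_drop]
        simp
      rw [← h0]
      exact List.getElem_mem _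
    have hdisj := revisit_disj g P i hi hPnd hPch hPne hlastc
    have hedge := revisit_edge g P i hi nd hPch hPne hlastc
    have htr : ∀ k ∈ g.keys, k ∉ P → altRep (restrictOut g P) k = altRep g k := by
      intro k _ hkP
      refine rep_transfer g P nd k hkP (fun cyc hck x hxc => hdisj k hkP cyc hck x hxc) ?_
      intro cyc hck p hp hpP hpc
      exact (hdisj k hkP cyc hck p.2 hpc) (hedge p hp hpP)
    have hM := moves_decomp g P nd hPnd hPkeys
    have hB := bonus_decomp g P nd hPnd hPkeys htr
    have hS := size_restrictOut g P nd hPnd hPkeys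
    have hgdlast : g.getD (P[P.length - 1]'(by omega)) "" = P[i]'hi := by
      have h1 : P[P.length - 1]'(by omega) = P.getLastD "" := by
        rw [lastD_eq_getElem _ hPne]
      rw [h1]
      exact PySem.Dict.getD_of_get?_eq_some _ _ hlastc
    by_cases hilast : i = P.length - 1
    · -- self-loop at the end: c = last
      have hceq : P[i]'hi = P.getLastD "" := by
        rw [lastD_eq_getElem _ hPne]
        congr 1
      have hclass : solveClassify count P (P[i]'hi) = count + (P.length : Int) - 1 := by
        unfold solveClassify
        rw [if_pos hceq]
      have hrepD : ∀ k ∈ P, altRep g k = false := by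
        intro k hk
        cases hck : altCycleThrough g k with
        | none => exact altRep_none g k hck
        | some cyc =>
          have hprops := cycSome_props g k cyc hck
          have hclosed := cyc_closed g k cyc hprops
          obtain ⟨j, hj, rfl⟩ := List.getElem_of_mem hk
          have hcmem : (P[i]'hi) ∈ cyc := chain_march g P (P[i]'hi) hPch hPne hlastc cyc
            hclosed j hj (cyc_head_mem g _ cyc hprops)
          have hsub : ∀ z ∈ cyc, z ∈ P.drop i :=
            orbit_sub g _ cyc hprops (P.drop i) hCcl (P[i]'hi) hcmem hc0
          have hdl : (P.drop i).length = 1 := by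
            rw [List.length_drop]
            omega
          have hclen : cyc.length ≤ 1 := by
            have := nodup_length_le cyc _ hprops.nodup hsub
            omega
          have h2f : decide (2 ≤ cyc.length) = false := by
            simp
            omega
          rw [altRep_some g _ cyc hck, h2f]
          simp
      have hmovD : P.filter (fun k => decide (g.getD k "" ≠ k)) = P.dropLast := by
        conv_lhs => rw [← List.dropLast_concat_getLast hPne]
        rw [List.filter_append]
        have h1 : P.dropLast.filter (fun k => decide (g.getD k "" ≠ k)) = P.dropLast := by
          rw [List.filter_eq_self]
          intro x hx
          obtain ⟨j, hj, hjx⟩ := List.getElem_of_mem hx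
          have hj' : j + 1 < P.length := by
            have hdl : P.dropLast.length = P.length - 1 := by simp
            omega
          rw [← hjx, List.getElem_dropLast]
          have hgd : g.getD (P[j]'(by omega)) "" = P[j+1]'hj' :=
            PySem.Dict.getD_of_get?_eq_some _ _ (hPch j hj')
          simp only [hgd, decide_eq_true_eq]
          exact (nodup_adjacent_ne P hPnd j hj').symm
        have h2 : [P.getLast hPne].filter (fun k => decide (g.getD k "" ≠ k)) = [] := by
          have hle : P.getLast hPne = P[P.length - 1]'(by omega) := List.getLast_eq_getElem hPne
          simp only [List.filter_cons, List.filter_nil]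
          rw [hle]
          have heq : g.getD (P[P.length - 1]'(by omega)) "" = P[P.length - 1]'(by omega) := by
            rw [hgdlast]
            congr 1 <;> omega
          simp [heq]
        rw [h1, h2, List.append_nil]
      have hbonD : P.filter (altRep g) = [] := by
        rw [List.filter_eq_nil_iff]
        intro a ha
        simp [hrepD a ha]
      refine ⟨restrictOut g P, nodup_keys_restrictOut g P nd, by omega, by rw [hwalk], ?_⟩
      rw [hwalk]
      dsimp only
      rw [hclass, hM, hB, hmovD, hbonD]
      simp only [List.length_nil]
      have hDlen : P.dropLast.length = P.length - 1 := by simp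
      push_cast [hDlen]
      omega
    · by_cases hi0 : i = 0
      · -- ===== pure cycle =====
        subst hi0
        have hlen2 : 2 ≤ P.length := by omega
        have hP0s : P[0]'hi = s := by
          rw [← hPhead, headD_eq_getElem _ hPne]
        have hns : ∀ k ∈ g.keys, k ∈ g.values := by
          rcases hsrc with hsA | hsB
          · exfalso
            apply hsA
            rw [← hP0s]
            exact mem_values_of_get?_some g _ _ hlastc
          · exact hsB
        obtain ⟨hvnd, hvk⟩ := nosource_perm g nd hns
        have hCycP : CycF g (P[0]'hi) P := by
          have := hCyc
          rwa [List.drop_zero] at this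
        have hPcl := cyc_closed g _ _ hCycP
        have hpureP : ∀ p ∈ g.items, p.2 ∈ P → p.1 ∈ P := by
          intro p hp hp2
          obtain ⟨a, b⟩ := p
          simp only at hp2 ⊢
          obtain ⟨t, ht, hbt⟩ := List.getElem_of_mem hp2
          have hga : g.get? a = some b := PySem.Dict.get?_of_mem_items g hp nd
          -- the in-cycle predecessor of b
          have hqex : ∃ q ∈ P, g.get? q = some b := by
            by_cases ht0 : t = 0
            · subst ht0
              refine ⟨P.getLastD "", lastD_mem P hPne, ?_⟩
              rw [hlastc]
              exact congrArg some hbt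
            · refine ⟨P[t-1]'(by omega), List.getElem_mem _, ?_⟩
              have hc := hPch (t-1) (by omega)
              rw [hc, ← hbt]
              simp only [show t - 1 + 1 = t from by omega]
          obtain ⟨q, hqP, hqb⟩ := hqex
          have hqit : (q, b) ∈ g.items := PySem.Dict.mem_items_of_get?_eq_some _ hqb
          have hait : (a, b) ∈ g.items := hp
          have hvnd2 : (g.items.map (fun x => x.2)).Nodup := hvnd
          have hinj := List.inj_on_of_nodup_map (l := g.items) (f := fun x => x.2)
            hvnd2 hait hqit rfl
          rw [show a = q from congrArg Prod.fst hinj]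
          exact hqP
        cases hm : PySem.List.min? P (fun x => x) with
        | none => exact absurd ((PySem.List.min?_eq_none_iff P _).mp hm) hPne
        | some m0 =>
        have hm0P : m0 ∈ P := PySem.List.min?_mem hm
        have hm0min : ∀ y ∈ P, m0 ≤ y := PySem.List.min?_isMin hm
        have hrepP : ∀ k ∈ P, altRep g k = decide (k = m0) := by
          intro k hk
          obtain ⟨j, hj, rfl⟩ := List.getElem_of_mem hk
          have hcy : CyclicG g (P[j]'hj) := ⟨P.length, hlp, cycle_iter_all g _ P hCycP j hj⟩
          obtain ⟨cyc, hck⟩ := Option.isSome_iff_exists.mp (cyc_isSome_of_cyclic g _ nd hcy)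
          have hprops := cycSome_props g _ cyc hck
          have hsub1 : ∀ z ∈ cyc, z ∈ P :=
            orbit_sub g _ cyc hprops P hPcl (P[j]'hj) (cyc_head_mem g _ cyc hprops)
              (List.getElem_mem _)
          have hsub2 : ∀ z ∈ P, z ∈ cyc :=
            orbit_sub g _ P hCycP cyc (cyc_closed g _ cyc hprops) (P[j]'hj)
              (List.getElem_mem _) (cyc_head_mem g _ cyc hprops)
          have hperm : cyc.Perm P := (List.perm_ext_iff_of_nodup hprops.nodup hPnd).mpr
            (fun a => ⟨fun h => hsub1 a h, fun h => hsub2 a h⟩)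
          have hclen : cyc.length = P.length := hperm.length_eq
          have h2le : decide (2 ≤ cyc.length) = true := by
            simp
            omega
          have hpure : altIsPure g cyc = true := (isPure_iff g cyc).mpr
            (fun p hp h2 => hsub2 _ (hpureP p hp (hsub1 _ h2)))
          have hminiff : PySem.List.min? cyc (fun x => x) = some (P[j]'hj) ↔ P[j]'hj = m0 := by
            rw [min?_id_iff cyc hprops.ne]
            constructor
            · rintro ⟨h1, h2⟩
              exact le_antisymm (h2 m0 (hsub2 m0 hm0P)) (hm0min _ (hsub1 _ h1))
            · intro hkm
              refine ⟨cyc_head_mem g _ cyc hprops, ?_⟩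
              intro y hy
              rw [hkm]
              exact hm0min y (hsub1 y hy)
          rw [altRep_some g _ cyc hck]
          by_cases hkm : P[j]'hj = m0
          · rw [hminiff.mpr hkm]
            simp [h2le, hpure, hkm]
          · have hne2 : PySem.List.min? cyc (fun x => x) ≠ some (P[j]'hj) :=
              fun h => hkm (hminiff.mp h)
            have hbeq : (PySem.List.min? cyc (fun x => x) == some (P[j]'hj)) = false := by
              simp only [beq_eq_false_iff_ne, ne_eq]
              exact hne2
            simp [h2le, hpure, hkm, hbeq]
        have hcnt : (P.filter (altRep g)).length = 1 := by
          have hfc : P.filter (altRep g) = P.filter (fun k => k == m0) :=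
            List.filter_congr (fun k hk => by rw [hrepP k hk, Bool.eq_iff_iff]; simp)
          rw [hfc, ← List.count_eq_length_filter]
          have h1 : 0 < P.count m0 := List.count_pos_iff.mpr hm0P
          have h2 : P.count m0 ≤ 1 := List.nodup_iff_count_le_one.mp hPnd m0
          omega
        have hclass : solveClassify count P (P[0]'hi) = count + (P.length : Int) + 1 := by
          unfold solveClassify
          rw [if_neg, if_pos]
          · rw [headD_eq_getElem _ hPne]
          · rw [lastD_eq_getElem _ hPne]
            intro hcon
            have := (hPnd.getElem_inj_iff).mp hcon
            omega
        have hmovP : P.filter (fun k => decide (g.getD k "" ≠ k)) = P := by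
          rw [List.filter_eq_self]
          intro x hx
          obtain ⟨j, hj, rfl⟩ := List.getElem_of_mem hx
          by_cases hj1 : j + 1 < P.length
          · have hgd : g.getD (P[j]'hj) "" = P[j+1]'hj1 :=
              PySem.Dict.getD_of_get?_eq_some _ _ (hPch j hj1)
            simp only [hgd, decide_eq_true_eq]
            exact (nodup_adjacent_ne P hPnd j hj1).symm
          · have hjl : j = P.length - 1 := by omega
            have hgd : g.getD (P[j]'hj) "" = P[0]'hi := by
              rw [show (P[j]'hj) = P[P.length - 1]'(by omega) from by congr 1]
              exact hgdlast
            simp only [hgd, decide_eq_true_eq]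
            intro hcon
            have := (hPnd.getElem_inj_iff).mp hcon
            omega
        refine ⟨restrictOut g P, nodup_keys_restrictOut g P nd, by omega, by rw [hwalk], ?_⟩
        rw [hwalk]
        dsimp only
        rw [hclass, hM, hB, hmovP, hcnt]
        push_cast
        omega
      · -- ===== impure cycle absorbed mid-path =====
        have hi1 : 0 < i := by omega
        have hil : i < P.length - 1 := by omega
        have hclass : solveClassify count P (P[i]'hi) = count + (P.length : Int) := by
          unfold solveClassify
          rw [if_neg, if_neg]
          · rw [headD_eq_getElem _ hPne]
            intro hcon
            have := (hPnd.getElem_inj_iff).mp hcon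
            omega
          · rw [lastD_eq_getElem _ hPne]
            intro hcon
            have := (hPnd.getElem_inj_iff).mp hcon
            omega
        have hrepD : ∀ k ∈ P, altRep g k = false := by
          intro k hk
          cases hck : altCycleThrough g k with
          | none => exact altRep_none g k hck
          | some cyc =>
            have hprops := cycSome_props g k cyc hck
            have hclosed := cyc_closed g k cyc hprops
            obtain ⟨j, hj, rfl⟩ := List.getElem_of_mem hk
            have hcmem : (P[i]'hi) ∈ cyc := chain_march g P (P[i]'hi) hPch hPne hlastc cyc
              hclosed j hj (cyc_head_mem g _ cyc hprops)
            have hsub : ∀ z ∈ cyc, z ∈ P.drop i :=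
              orbit_sub g _ cyc hprops (P.drop i) hCcl (P[i]'hi) hcmem hc0
            have hwit : ((P[i-1]'(by omega)), (P[i]'hi)) ∈ g.items := by
              have hc := hPch (i-1) (by omega)
              have hc2 : g.get? (P[i-1]'(by omega)) = some (P[i]'hi) := by
                rw [hc]
                simp only [show i - 1 + 1 = i from by omega]
              exact PySem.Dict.mem_items_of_get?_eq_some _ hc2
            have hnotin : (P[i-1]'(by omega)) ∉ cyc := by
              intro hin
              obtain ⟨t, ht, hteq⟩ := List.getElem_of_mem (hsub _ hin)
              rw [List.getElem_drop] at hteq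
              have := (hPnd.getElem_inj_iff).mp hteq
              omega
            have hpf : altIsPure g cyc = false := by
              by_contra hcon
              rw [Bool.not_eq_false] at hcon
              exact hnotin ((isPure_iff g cyc).mp hcon _ hwit hcmem)
            rw [altRep_some g _ cyc hck, hpf]
            simp
        have hmovP : P.filter (fun k => decide (g.getD k "" ≠ k)) = P := by
          rw [List.filter_eq_self]
          intro x hx
          obtain ⟨j, hj, rfl⟩ := List.getElem_of_mem hx
          by_cases hj1 : j + 1 < P.length
          · have hgd : g.getD (P[j]'hj) "" = P[j+1]'hj1 :=
              PySem.Dict.getD_of_get?_eq_some _ _ (hPch j hj1)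
            simp only [hgd, decide_eq_true_eq]
            exact (nodup_adjacent_ne P hPnd j hj1).symm
          · have hgd : g.getD (P[j]'hj) "" = P[i]'hi := by
              rw [show (P[j]'hj) = P[P.length - 1]'(by omega) from by congr 1; omega]
              exact hgdlast
            simp only [hgd, decide_eq_true_eq]
            intro hcon
            have := (hPnd.getElem_inj_iff).mp hcon
            omega
        have hbonD : P.filter (altRep g) = [] := by
          rw [List.filter_eq_nil_iff]
          intro a ha
          simp [hrepD a ha]
        refine ⟨restrictOut g P, nodup_keys_restrictOut g P nd, by omega, by rw [hwalk], ?_⟩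
        rw [hwalk]
        dsimp only
        rw [hclass, hM, hB, hmovP, hbonD]
        simp only [List.length_nil]
        push_cast
        omega

-- ---------- the outer-iteration delta lemma ----------

theorem solveLoop_succ (fuel : Nat) (g : PySem.Dict String String) (count : Int) :
    solveLoop (fuel+1) g count = if g.size == 0 then count
      else
        let possible := g.keys.filter (fun v => !(g.values.contains v))
        let current := match possible with
          | c :: _ => c
          | [] => g.keys.headD ""
        let r := solveWalk (g.size + 1) g [] current
        solveLoop fuel r.1 (solveClassify count r.2.1 r.2.2) := rfl

theorem iter_delta (g : PySem.Dict String String) (nd : g.keys.Nodup) (hne : g.size ≠ 0)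
    (count : Int) :
    ∃ g' : PySem.Dict String String, g'.keys.Nodup ∧ g'.size < g.size ∧
      (let possible := g.keys.filter (fun v => !(g.values.contains v))
       let current := match possible with
         | c :: _ => c
         | [] => g.keys.headD ""
       let r := solveWalk (g.size + 1) g [] current
       r.1 = g' ∧ solveClassify count r.2.1 r.2.2 + altMoves g' + altBonus g'
             = count + altMoves g + altBonus g) := by
  have hkne : g.keys ≠ [] := by
    intro h
    rw [size_keys, h] at hne
    simp at hne
  cases hposs : g.keys.filter (fun v => !(g.values.contains v)) with
  | cons c t =>
    have hc : c ∈ g.keys.filter (fun v => !(g.values.contains v)) := by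
      rw [hposs]
      exact List.mem_cons_self ..
    have hc2 := List.mem_filter.mp hc
    have hcv : c ∉ g.values := by simpa using hc2.2
    obtain ⟨g', h1, h2, h3, h4⟩ := iter_delta' g nd c hc2.1 (Or.inl hcv) count
    refine ⟨g', h1, h2, ?_⟩
    dsimp only
    exact ⟨h3, h4⟩
  | nil =>
    have hns : ∀ k ∈ g.keys, k ∈ g.values := by
      intro k hk
      by_contra hkv
      have hmem : k ∈ g.keys.filter (fun v => !(g.values.contains v)) :=
        List.mem_filter.mpr ⟨hk, by simpa using hkv⟩
      rw [hposs] at hmem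
      cases hmem
    obtain ⟨g', h1, h2, h3, h4⟩ := iter_delta' g nd (g.keys.headD "") (headD_mem _ hkne)
      (Or.inr hns) count
    refine ⟨g', h1, h2, ?_⟩
    dsimp only
    exact ⟨h3, h4⟩

-- ---------- the main loop theorem ----------

theorem loop_eq (fuel : Nat) : ∀ (g : PySem.Dict String String) (count : Int),
    g.keys.Nodup → g.size < fuel →
    solveLoop fuel g count = count + altMoves g + altBonus g := by
  induction fuel with
  | zero => intro g count _ hf; omega
  | succ fuel ih =>
    intro g count nd hf
    by_cases hz : g.size = 0
    · have hit : g.items = [] := by rwa [← List.length_eq_zero_iff]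
      have hzb : (g.size == 0) = true := by simpa using hz
      rw [solveLoop_succ, if_pos hzb]
      have hmz : altMoves g = 0 := by simp [altMoves, hit]
      have hbz : altBonus g = 0 := by
        have hk : g.keys = [] := by simp [PySem.Dict.keys, hit]
        simp [altBonus, hk]
      rw [hmz, hbz]
      ring
    · have hzb : (g.size == 0) = false := by simpa using hz
      rw [solveLoop_succ, if_neg (by simp [hzb])]
      obtain ⟨g', h1, h2, h3, h4⟩ := iter_delta g nd hz count
      dsimp only at h3 h4 ⊢
      rw [h3, ih g' _ h1 (by omega)]
      exact h4

-- ===== VERDICT (by name: the statement is the Claim_ definition above) =====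
theorem solve_spec : Claim_equal_solve := by
  intro graph _
  unfold Spec_solve solve solve_alt
  dsimp only
  split_ifs with hb hid
  · rfl
  · rfl
  · have h := loop_eq ((PySem.Dict.ofList graph).size + 1) (PySem.Dict.ofList graph) 0
      (PySem.Dict.nodup_keys_ofList graph) (by omega)
    rw [h]
    ring
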